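-- pv_equiv track=rewrite | github.com/kyle0527/BioNeuronai | src/bioneuronai/production_idor_module.py | _is_id_parameter
-- ===== SOURCE A (Python) =====
-- def _is_id_parameter(param_name: str) -> bool:
--     """判斷參數名是否為ID參數"""
--     id_indicators = [
--         'id', 'user_id', 'userId', 'account_id', 'accountId',
--         'profile_id', 'profileId', 'order_id', 'orderId',
--         'document_id', 'documentId', 'file_id', 'fileId',
--         'message_id', 'messageId', 'post_id', 'postId'
--     ]
--
--     param_lower = param_name.lower()
--     return any(indicator in param_lower for indicator in id_indicators)
-- ===== SOURCE B (Python) =====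
-- def _is_id_parameter(param_name: str) -> bool:
--     """判斷參數名是否為ID參數"""
--     return 'id' in param_name.lower()
-- ===== Notes on version B (the rewrite author's own statement) =====
-- stated objective: simpler
-- what changed: Drops the 17-element indicator list and the any() scan: every indicator that can ever match contains the substring 'id' (and the camelCase entries can never match a lowercased string), so the whole scan collapses to the single test 'id' in param_name.lower().
import Mathlib
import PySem

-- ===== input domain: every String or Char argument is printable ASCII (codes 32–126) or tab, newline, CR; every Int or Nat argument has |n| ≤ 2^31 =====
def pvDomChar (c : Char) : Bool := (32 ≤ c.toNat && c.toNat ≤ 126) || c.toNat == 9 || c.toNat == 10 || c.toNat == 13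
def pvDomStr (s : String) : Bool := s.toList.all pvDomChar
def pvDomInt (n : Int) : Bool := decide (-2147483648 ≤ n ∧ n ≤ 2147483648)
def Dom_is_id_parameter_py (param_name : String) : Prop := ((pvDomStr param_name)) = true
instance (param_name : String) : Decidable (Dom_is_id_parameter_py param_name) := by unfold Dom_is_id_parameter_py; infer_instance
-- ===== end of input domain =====

-- B replaces the 17-indicator any() scan with the single test 'id' in param_name.lower() (equivalent: each matchable indicator contains "id"); objective: simpler.

-- ===== PORT A =====
def is_id_parameter_py (param_name : String) : Bool :=
  let id_indicators : List String :=
    ["id", "user_id", "userId", "account_id", "accountId",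
     "profile_id", "profileId", "order_id", "orderId",
     "document_id", "documentId", "file_id", "fileId",
     "message_id", "messageId", "post_id", "postId"]
  let param_lower := PySem.Str.lower param_name
  id_indicators.any (fun indicator => PySem.Str.isIn indicator param_lower)

-- ===== PORT B =====
def is_id_parameter_py_alt (param_name : String) : Bool :=
  PySem.Str.isIn "id" (PySem.Str.lower param_name)

-- ===== PRECONDITION & SPEC =====
def Spec_is_id_parameter_py (param_name : String) (out : Bool) : Prop := out = is_id_parameter_py_alt param_name
instance (param_name : String) (out : Bool) : Decidable (Spec_is_id_parameter_py param_name out) := by unfold Spec_is_id_parameter_py; infer_instance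

-- ===== CLAIM (what is proved, stated in full; the proofs are below) =====
def Claim_equal_is_id_parameter_py : Prop := ∀ (param_name : String), Dom_is_id_parameter_py param_name → Spec_is_id_parameter_py param_name (is_id_parameter_py param_name)

-- ===== LEMMAS AND PROOFS =====

-- Python's str.lower never produces an uppercase 'I', so the camelCase indicators can never match
theorem lowerChar_ne_I (c : Char) : PySem.Chars.lowerChar c ≠ 'I' := by
  unfold PySem.Chars.lowerChar PySem.Chars.isupper
  split_ifs with h
  · intro he
    rw [Bool.and_eq_true, decide_eq_true_iff, decide_eq_true_iff] at h
    have hge : 65 ≤ c.toNat := h.1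
    have hle : c.toNat ≤ 90 := h.2
    have hv : (c.toNat + 32).isValidChar := by left; omega
    have ht : (Char.ofNat (c.toNat + 32)).toNat = c.toNat + 32 := by
      rw [Char.toNat_ofNat, if_pos hv]
    rw [he] at ht
    have : ('I').toNat = 73 := rfl
    omega
  · intro he
    rw [he] at h
    exact h (by decide)

theorem no_I (p : String) : 'I' ∉ (PySem.Str.lower p).toList := by
  rw [PySem.Str.toList_lower]
  unfold PySem.Chars.lower
  intro hm
  rcases List.mem_map.mp hm with ⟨c, _, hc⟩
  exact lowerChar_ne_I c hc

-- every snake_case indicator contains "id" as a substring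
theorem indicator_implies_id (ind s : String)
    (h : "id".toList <:+: ind.toList)
    (hin : PySem.Str.isIn ind s = true) : PySem.Str.isIn "id" s = true := by
  rw [PySem.Str.isIn_iff_infix] at hin ⊢
  exact h.trans hin

-- an indicator containing 'I' never matches a string without 'I'
theorem camel_no_match (ind s : String) (hI : 'I' ∈ ind.toList)
    (hs : 'I' ∉ s.toList) (hin : PySem.Str.isIn ind s = true) : False := by
  rw [PySem.Str.isIn_iff_infix] at hin
  exact hs (hin.subset hI)

-- ===== VERDICT (by name: the statement is the Claim_ definition above) =====
theorem is_id_parameter_py_spec : Claim_equal_is_id_parameter_py := by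
  intro p _
  unfold Spec_is_id_parameter_py is_id_parameter_py is_id_parameter_py_alt
  cases h : PySem.Str.isIn "id" (PySem.Str.lower p) with
  | true =>
    exact List.any_eq_true.mpr ⟨"id", by simp, h⟩
  | false =>
    rw [List.any_eq_false]
    intro ind hmem hcon
    fin_cases hmem <;>
      first
        | exact absurd (indicator_implies_id _ _ (by decide) hcon) (by simp only [h]; decide)
        | exact camel_no_match _ _ (by decide) (no_I p) hcon
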